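-- pv_equiv track=rewrite | github.com/james-stuff/AdventofCode | main.py | day_20_load_data
-- ===== SOURCE A (Python) =====
-- def day_20_load_data(raw_lines: [str]) -> (str, [str]):
--     algorithm, input_image = '', []
--     for rl in raw_lines:
--         if len(algorithm) < 512:
--             algorithm += rl
--         elif len(rl) > 0:
--             input_image.append(rl)
--     return algorithm, input_image
-- ===== SOURCE B (Python) =====
-- def day_20_load_data(raw_lines: [str]) -> (str, [str]):
--     # Arithmetic on line lengths only: find the cut index k where the running
--     # total of lengths first reaches 512, then join/slice/filter around it.
--     total = 0
--     k = len(raw_lines)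
--     for i, rl in enumerate(raw_lines):
--         total += len(rl)
--         if total >= 512:
--             k = i + 1
--             break
--     return ''.join(raw_lines[:k]), [rl for rl in raw_lines[k:] if rl]
-- ===== Notes on version B (the rewrite author's own statement) =====
-- stated objective: alternative
-- what changed: Instead of building the algorithm string incrementally inside a branchy loop, B computes a cut index k from a running sum of line lengths alone, then produces the result by slicing: ''.join(raw_lines[:k]) for the algorithm and a filtered raw_lines[k:] for the image.
import Mathlib
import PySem

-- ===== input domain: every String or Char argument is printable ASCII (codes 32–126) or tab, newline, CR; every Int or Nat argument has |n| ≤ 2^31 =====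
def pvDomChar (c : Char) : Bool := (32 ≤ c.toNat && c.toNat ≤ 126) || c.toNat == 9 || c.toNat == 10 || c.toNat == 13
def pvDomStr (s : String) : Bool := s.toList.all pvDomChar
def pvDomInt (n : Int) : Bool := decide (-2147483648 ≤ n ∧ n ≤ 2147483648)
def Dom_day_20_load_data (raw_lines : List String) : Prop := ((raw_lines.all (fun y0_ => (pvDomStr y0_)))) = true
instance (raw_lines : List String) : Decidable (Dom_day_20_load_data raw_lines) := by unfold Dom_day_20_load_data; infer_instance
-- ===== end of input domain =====

-- B replaces A's single branchy loop (incremental string building) by computing a cut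
-- index from a running sum of line lengths, then joining/slicing/filtering around it.


-- ===== PORT A =====
-- A's single loop: state (algorithm, input_image), branch on len(algorithm) < 512 each line.
def day20LoopA : List String → String → List String → String × List String
  | [], alg, img => (alg, img)
  | rl :: rest, alg, img =>
      if PySem.Str.len alg < 512 then day20LoopA rest (alg ++ rl) img
      else if PySem.Str.len rl > 0 then day20LoopA rest alg (img ++ [rl])
      else day20LoopA rest alg img

def day_20_load_data (raw_lines : List String) : String × List String :=
  day20LoopA raw_lines "" []

-- ===== PORT B =====
-- B's cut search: running total of line lengths; first index whose running total
-- reaches 512 ends the scan (k = i + 1); if it never does, k = len(raw_lines).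
def day20Cut : List String → Int → Nat
  | [], _ => 0
  | rl :: rest, total =>
      let total' := total + PySem.Str.len rl
      if 512 ≤ total' then 1 else 1 + day20Cut rest total'

def day_20_load_data_alt (raw_lines : List String) : String × List String :=
  let k := day20Cut raw_lines 0
  (PySem.Str.join "" (raw_lines.take k),
   (raw_lines.drop k).filter (fun rl => PySem.Str.len rl > 0))

-- ===== PRECONDITION & SPEC =====
def Spec_day_20_load_data (raw_lines : List String) (out : String × List String) : Prop := out = day_20_load_data_alt raw_lines
instance (raw_lines : List String) (out : String × List String) : Decidable (Spec_day_20_load_data raw_lines out) := by unfold Spec_day_20_load_data; infer_instance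

-- ===== CLAIM (what is proved, stated in full; the proofs are below) =====
def Claim_equal_day_20_load_data : Prop := ∀ (raw_lines : List String), Dom_day_20_load_data raw_lines → Spec_day_20_load_data raw_lines (day_20_load_data raw_lines)

-- ===== LEMMAS AND PROOFS =====

-- ''.join over a cons peels off its head.
theorem str_join_empty_cons (a : String) (xs : List String) :
    PySem.Str.join "" (a :: xs) = a ++ PySem.Str.join "" xs := by
  cases xs with
  | nil => simp [PySem.Str.join, PySem.Chars.join, List.intercalate]
  | cons b ys => simp [PySem.Str.join, PySem.Chars.join_cons_cons]

-- Length of a concatenation adds.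
theorem str_len_append (a b : String) :
    PySem.Str.len (a ++ b) = PySem.Str.len a + PySem.Str.len b := by
  simp [PySem.Str.len_eq]

-- Once the algorithm is long enough, A's loop only filters the rest into the image.
theorem day20LoopA_saturated (rest : List String) :
    ∀ (alg : String) (img : List String), 512 ≤ PySem.Str.len alg →
      day20LoopA rest alg img =
        (alg, img ++ rest.filter (fun rl => PySem.Str.len rl > 0)) := by
  induction rest with
  | nil => intro alg img _; simp [day20LoopA]
  | cons rl rest ih =>
      intro alg img h
      simp only [day20LoopA, List.filter]
      rw [if_neg (by omega)]
      by_cases hrl : PySem.Str.len rl > 0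
      · rw [if_pos hrl, ih _ _ h]
        simp [PySem.Str.len_eq] at hrl
        simp [hrl]
      · rw [if_neg hrl, ih _ _ h]
        simp [PySem.Str.len_eq] at hrl
        simp [hrl]

-- While the algorithm is short, A's loop equals B's join/slice/filter around the cut
-- computed from the running total, which tracks the algorithm's current length.
theorem day20LoopA_cut (rest : List String) :
    ∀ (alg : String) (img : List String), PySem.Str.len alg < 512 →
      day20LoopA rest alg img =
        (alg ++ PySem.Str.join "" (rest.take (day20Cut rest (PySem.Str.len alg))),
         img ++ (rest.drop (day20Cut rest (PySem.Str.len alg))).filter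
                  (fun rl => PySem.Str.len rl > 0)) := by
  induction rest with
  | nil =>
      intro alg img _
      simp [day20LoopA, day20Cut, PySem.Str.join, PySem.Chars.join, List.intercalate]
  | cons rl rest ih =>
      intro alg img h
      simp only [day20LoopA, day20Cut]
      rw [if_pos h]
      by_cases h' : 512 ≤ PySem.Str.len alg + PySem.Str.len rl
      · rw [if_pos h', day20LoopA_saturated rest _ img (by rw [str_len_append]; omega)]
        simp [PySem.Str.join, PySem.Chars.join, List.intercalate]
      · rw [if_neg h', ih _ img (by rw [str_len_append]; omega)]
        rw [str_len_append] at *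
        rw [Nat.add_comm 1]
        simp [List.take_succ_cons, List.drop_succ_cons, str_join_empty_cons,
              String.append_assoc]

-- ===== VERDICT (by name: the statement is the Claim_ definition above) =====
theorem day_20_load_data_spec : Claim_equal_day_20_load_data := by
  intro raw_lines _
  unfold Spec_day_20_load_data day_20_load_data day_20_load_data_alt
  rw [day20LoopA_cut raw_lines "" [] (by simp [PySem.Str.len_eq])]
  simp [PySem.Str.len_eq]
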